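-- pv_equiv track=rewrite | github.com/cmottao/WhatIsThis | problemas/cadenas.py | incluida
-- ===== SOURCE A (Python) =====
-- def contar_ocurrencias(a,b):
--     s = 0
--     for x in b:
--         if a == x:
--             s += 1
--     return s
--
-- def incluida(a,b):
--     n = len(a)
--     m = len(b)
--     if n > m:
--         return False
--     else:
--         s = True
--         for x in a:
--             s = s and (contar_ocurrencias(x,a) <= contar_ocurrencias(x, b))
--         return s
-- ===== SOURCE B (Python) =====
-- def incluida(a, b):
--     # Count each character of b once, then consume counts while scanning a.
--     cnt = {}
--     for c in b:
--         cnt[c] = cnt.get(c, 0) + 1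
--     for c in a:
--         k = cnt.get(c, 0)
--         if k == 0:
--             return False
--         cnt[c] = k - 1
--     return True
-- ===== Notes on version B (the rewrite author's own statement) =====
-- stated objective: faster
-- what changed: Replaces the per-character full rescans of both strings (contar_ocurrencias called twice for every character of a) with a single counting pass over b into a dict and one consuming pass over a, removing the n>m guard as redundant.
import Mathlib
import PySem

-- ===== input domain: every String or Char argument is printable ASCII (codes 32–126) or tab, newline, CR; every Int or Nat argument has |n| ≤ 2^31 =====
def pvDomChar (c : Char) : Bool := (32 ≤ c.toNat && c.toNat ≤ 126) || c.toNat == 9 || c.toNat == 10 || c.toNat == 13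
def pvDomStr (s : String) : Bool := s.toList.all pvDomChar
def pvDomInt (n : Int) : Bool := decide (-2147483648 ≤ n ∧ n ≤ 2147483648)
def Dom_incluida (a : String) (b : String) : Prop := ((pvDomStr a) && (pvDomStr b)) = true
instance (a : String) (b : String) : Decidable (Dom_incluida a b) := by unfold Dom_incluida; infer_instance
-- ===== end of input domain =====

-- B replaces A's repeated full rescans of both strings with one counting pass over b
-- and one consuming pass over a (faster: O(n+m) vs O(n*(n+m))).

-- ===== PORT A =====
def contarOcurrencias (a : Char) (b : List Char) : Int :=
  b.foldl (fun s x => if a == x then s + 1 else s) 0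

def incluida (a : String) (b : String) : Bool :=
  let n := PySem.Str.len a
  let m := PySem.Str.len b
  if n > m then false
  else
    a.toList.foldl
      (fun s x => s && decide (contarOcurrencias x a.toList ≤ contarOcurrencias x b.toList))
      true

-- ===== PORT B =====
def incluidaLoop : List Char → PySem.Dict Char Int → Bool
  | [], _ => true
  | c :: rest, d =>
      let k := d.getD c 0
      if k == 0 then false
      else incluidaLoop rest (d.insert c (k - 1))

def incluida_alt (a : String) (b : String) : Bool :=
  let cnt := b.toList.foldl (fun d c => d.insert c (d.getD c 0 + 1)) PySem.Dict.empty
  incluidaLoop a.toList cnt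

-- ===== PRECONDITION & SPEC =====
def Spec_incluida (a : String) (b : String) (out : Bool) : Prop := out = incluida_alt a b
instance (a : String) (b : String) (out : Bool) : Decidable (Spec_incluida a b out) := by unfold Spec_incluida; infer_instance

-- ===== CLAIM (what is proved, stated in full; the proofs are below) =====
def Claim_equal_incluida : Prop := ∀ (a : String) (b : String), Dom_incluida a b → Spec_incluida a b (incluida a b)

-- ===== LEMMAS AND PROOFS =====

theorem contar_eq_count (a : Char) (b : List Char) :
    contarOcurrencias a b = (b.count a : Int) := by
  unfold contarOcurrencias
  suffices h : ∀ (l : List Char) (s : Int),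
      l.foldl (fun s x => if a == x then s + 1 else s) s = s + (l.count a : Int) by
    simpa using h b 0
  intro l
  induction l with
  | nil => intro s; simp
  | cons x xs ih =>
      intro s
      rw [List.foldl_cons, ih, List.count_cons]
      by_cases hx : a = x
      · simp [hx]
        omega
      · have h1 : (a == x) = false := by simp [hx]
        have h2 : (x == a) = false := by simp; exact fun h => hx h.symm
        simp [h1, h2]

theorem foldl_and_all (p : Char → Bool) (l : List Char) (s : Bool) :
    l.foldl (fun s x => s && p x) s = (s && l.all p) := by
  induction l generalizing s with
  | nil => simp
  | cons x xs ih => simp [List.foldl, ih, Bool.and_assoc]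

-- greedy consumption succeeds iff each char of l is within the dict budget
theorem loop_iff (l : List Char) :
    ∀ (d : PySem.Dict Char Int), (∀ c, 0 ≤ d.getD c 0) →
      (incluidaLoop l d = true ↔ ∀ c ∈ l, (l.count c : Int) ≤ d.getD c 0) := by
  induction l with
  | nil => intro d _; simp [incluidaLoop]
  | cons c rest ih =>
      intro d hpos
      set k := d.getD c 0 with hk
      by_cases hk0 : k = 0
      · have hfalse : incluidaLoop (c :: rest) d = false := by
          simp [incluidaLoop, ← hk, hk0]
        rw [hfalse]
        constructor
        · intro h; exact absurd h (by simp)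
        · intro h
          have := h c (by simp)
          rw [List.count_cons] at this
          simp at this
          omega
      · have hk1 : 1 ≤ k := by have := hpos c; rw [← hk] at this; omega
        have hstep : incluidaLoop (c :: rest) d = incluidaLoop rest (d.insert c (k - 1)) := by
          simp [incluidaLoop, ← hk, hk0]
        have hpos' : ∀ c', 0 ≤ (d.insert c (k - 1)).getD c' 0 := by
          intro c'
          rw [PySem.Dict.getD_insert]
          split_ifs with h
          · omega
          · exact hpos c'
        rw [hstep, ih _ hpos']
        have hcount : ∀ c' : Char, (((c :: rest).count c' : Int))
            = (rest.count c' : Int) + (if c = c' then 1 else 0) := by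
          intro c'
          rw [List.count_cons]
          by_cases hcc : c = c' <;> simp [hcc]
        constructor
        · intro h c' hc'
          rcases eq_or_ne c' c with he | he
          · subst he
            rw [hcount, if_pos rfl, ← hk]
            by_cases hmem : c' ∈ rest
            · have h2 := h c' hmem
              rw [PySem.Dict.getD_insert, if_pos rfl] at h2
              omega
            · have h0 : rest.count c' = 0 := List.count_eq_zero.mpr hmem
              rw [h0]
              simp
              omega
          · have h2 : (rest.count c' : Int) ≤ d.getD c' 0 := by
              rcases List.mem_cons.mp hc' with h1 | h1
              · exact absurd h1 he
              · have := h c' h1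
                rwa [PySem.Dict.getD_insert, if_neg he] at this
            rw [hcount, if_neg (fun hh => he hh.symm)]
            omega
        · intro h c' hc'
          rw [PySem.Dict.getD_insert]
          rcases eq_or_ne c' c with he | he
          · subst he
            have h2 := h c' (by simp)
            rw [hcount, if_pos rfl, ← hk] at h2
            rw [if_pos rfl]
            omega
          · rw [if_neg he]
            have h2 := h c' (List.mem_cons_of_mem _ hc')
            rw [hcount, if_neg (fun hh => he hh.symm)] at h2
            omega

theorem alt_eq_all (a b : String) :
    incluida_alt a b
      = a.toList.all (fun x => decide ((a.toList.count x : Int) ≤ (b.toList.count x : Int))) := by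
  unfold incluida_alt
  have hcnt : ∀ c, (b.toList.foldl (fun d c => d.insert c (d.getD c 0 + 1)) PySem.Dict.empty).getD c 0
      = (b.toList.count c : Int) := by
    intro c
    rw [PySem.Dict.getD_foldl_insert_add_one]
    simp
  have hpos : ∀ c : Char, (0 : Int) ≤ (b.toList.foldl (fun d c => d.insert c (d.getD c 0 + 1)) PySem.Dict.empty).getD c 0 := by
    intro c
    rw [hcnt c]
    exact Int.natCast_nonneg _
  by_cases h : ∀ c ∈ a.toList, (a.toList.count c : Int) ≤ (b.toList.count c : Int)
  · have h1 : incluidaLoop a.toList _ = true := (loop_iff a.toList _ hpos).mpr (by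
      intro c hc; rw [hcnt]; exact h c hc)
    show incluidaLoop a.toList (b.toList.foldl (fun d c => d.insert c (d.getD c 0 + 1)) PySem.Dict.empty) = _
    rw [h1]
    symm
    simp only [List.all_eq_true]
    intro x hx
    simpa using h x hx
  · have h1 : incluidaLoop a.toList (b.toList.foldl (fun d c => d.insert c (d.getD c 0 + 1)) PySem.Dict.empty) ≠ true := by
      intro hT
      exact h (by
        intro c hc
        have := (loop_iff a.toList _ hpos).mp hT c hc
        rwa [hcnt] at this)
    have h1f : incluidaLoop a.toList (b.toList.foldl (fun d c => d.insert c (d.getD c 0 + 1)) PySem.Dict.empty) = false :=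
      Bool.eq_false_iff.mpr h1
    show incluidaLoop a.toList (b.toList.foldl (fun d c => d.insert c (d.getD c 0 + 1)) PySem.Dict.empty) = _
    rw [h1f]
    symm
    rw [← Bool.not_eq_true]
    simp only [List.all_eq_true]
    intro hall
    exact h (fun c hc => by simpa using hall c hc)

theorem count_le_of_all (a b : String)
    (h : ∀ c ∈ a.toList, (a.toList.count c : Int) ≤ (b.toList.count c : Int)) :
    a.toList.length ≤ b.toList.length := by
  have hm : (a.toList : Multiset Char) ≤ (b.toList : Multiset Char) := by
    rw [Multiset.le_iff_count]
    intro c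
    by_cases hc : c ∈ a.toList
    · have := h c hc
      simpa using (by exact_mod_cast this : a.toList.count c ≤ b.toList.count c)
    · simp [Multiset.coe_count, List.count_eq_zero.mpr hc]
  simpa using Multiset.card_le_card hm

-- ===== VERDICT (by name: the statement is the Claim_ definition above) =====
theorem incluida_spec : Claim_equal_incluida := by
  intro a b _
  unfold Spec_incluida incluida
  rw [alt_eq_all]
  have hlena : PySem.Str.len a = (a.toList.length : Int) := by
    rw [PySem.Str.len_eq]
  have hlenb : PySem.Str.len b = (b.toList.length : Int) := by
    rw [PySem.Str.len_eq]
  by_cases hlen : a.toList.length > b.toList.length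
  · rw [if_pos (by rw [hlena, hlenb]; exact_mod_cast hlen)]
    symm
    rw [← Bool.not_eq_true]
    simp only [List.all_eq_true]
    intro hall
    have := count_le_of_all a b (fun c hc => by simpa using hall c hc)
    omega
  · rw [if_neg (by rw [hlena, hlenb]; intro h; exact hlen (by exact_mod_cast h))]
    rw [foldl_and_all]
    simp only [Bool.true_and]
    congr 1
    funext x
    simp [contar_eq_count]
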